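-- pv_equiv track=rewrite | github.com/sophia-ai-safety/shape-of-beliefs | app/steering_explorer_app.py | order_subset_labels
-- ===== SOURCE A (Python) =====
-- def order_subset_labels(token_strings: list[str]) -> tuple[list[int], list[str]]:
--     numeric = [(i, int(lbl)) for i, lbl in enumerate(token_strings) if lbl.isdigit()]
--     numeric_sorted = sorted(numeric, key=lambda t: t[1])
--     num_indices = [i for i, _ in numeric_sorted]
--     other_indices = [i for i, lbl in enumerate(token_strings) if not lbl.isdigit()]
--     ordered_indices = num_indices + other_indices
--     ordered_labels = [token_strings[i] for i in ordered_indices]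
--     return ordered_indices, ordered_labels
-- ===== SOURCE B (Python) =====
-- def order_subset_labels(token_strings: list[str]) -> tuple[list[int], list[str]]:
--     def sort_key(i):
--         lbl = token_strings[i]
--         if lbl.isdigit():
--             return (0, int(lbl))
--         return (1, 0)
--     ordered_indices = sorted(range(len(token_strings)), key=sort_key)
--     return ordered_indices, [token_strings[i] for i in ordered_indices]
-- ===== Notes on version B (the rewrite author's own statement) =====
-- stated objective: simpler
-- what changed: Replaces the two filtered passes, the pair sort and the concatenation with one stable sort of all indices under a tuple key (0, int(lbl)) / (1, 0); stability keeps non-numeric labels in original order after the value-sorted numeric ones.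
import Mathlib
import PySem

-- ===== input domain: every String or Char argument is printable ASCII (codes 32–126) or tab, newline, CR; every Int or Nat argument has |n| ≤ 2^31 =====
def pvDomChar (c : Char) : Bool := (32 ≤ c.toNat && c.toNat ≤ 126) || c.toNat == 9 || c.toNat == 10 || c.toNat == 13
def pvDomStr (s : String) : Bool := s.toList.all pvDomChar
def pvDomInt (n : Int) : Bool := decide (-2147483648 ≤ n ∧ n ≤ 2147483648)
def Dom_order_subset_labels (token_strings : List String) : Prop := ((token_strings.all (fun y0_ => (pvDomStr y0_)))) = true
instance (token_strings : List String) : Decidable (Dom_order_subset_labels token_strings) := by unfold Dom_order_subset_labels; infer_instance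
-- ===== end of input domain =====

-- B replaces A's filter/sort/concatenate by one stable sort of all indices under the tuple key
-- (0, int(lbl)) / (1, 0); objective: simpler.

-- ===== PORT A =====
-- int(lbl) is ported as (PySem.Int.ofStr? lbl).getD 0: it is only evaluated on labels with
-- strIsdigit = true, where ofStr? is always `some` on the printable-ASCII domain.
-- token_strings[i] is ported as (pyGet? …).getD "": i always comes from enumerate, hence in range.
def order_subset_labels (token_strings : List String) : List Int × List String :=
  let numeric : List (Int × Int) :=
    ((PySem.List.enumerate token_strings).filter (fun p => PySem.Str.strIsdigit p.2)).map
      (fun p => (p.1, (PySem.Int.ofStr? p.2).getD 0))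
  let numeric_sorted := PySem.List.sorted numeric (fun t => t.2)
  let num_indices := numeric_sorted.map (fun t => t.1)
  let other_indices :=
    ((PySem.List.enumerate token_strings).filter (fun p => !PySem.Str.strIsdigit p.2)).map
      (fun p => p.1)
  let ordered_indices := num_indices ++ other_indices
  let ordered_labels := ordered_indices.map (fun i => (PySem.List.pyGet? token_strings i).getD "")
  (ordered_indices, ordered_labels)

-- ===== PORT B =====
-- sort_key(i) = (0, int(lbl)) if lbl.isdigit() else (1, 0); ported as the two key
-- components of PySem.List.sorted2. Same getD conventions as in port A (always in range / some).
def pvKey1 (token_strings : List String) (i : Int) : Int :=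
  if PySem.Str.strIsdigit ((PySem.List.pyGet? token_strings i).getD "") then 0 else 1
def pvKey2 (token_strings : List String) (i : Int) : Int :=
  if PySem.Str.strIsdigit ((PySem.List.pyGet? token_strings i).getD "") then
    (PySem.Int.ofStr? ((PySem.List.pyGet? token_strings i).getD "")).getD 0
  else 0
def order_subset_labels_alt (token_strings : List String) : List Int × List String :=
  let ordered_indices :=
    PySem.List.sorted2 (PySem.List.pyRange 0 (token_strings.length) 1)
      (pvKey1 token_strings) (pvKey2 token_strings)
  (ordered_indices, ordered_indices.map (fun i => (PySem.List.pyGet? token_strings i).getD ""))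

-- ===== PRECONDITION & SPEC =====
def Spec_order_subset_labels (token_strings : List String) (out : List Int × List String) : Prop := out = order_subset_labels_alt token_strings
instance (token_strings : List String) (out : List Int × List String) : Decidable (Spec_order_subset_labels token_strings out) := by unfold Spec_order_subset_labels; infer_instance

-- ===== CLAIM (what is proved, stated in full; the proofs are below) =====
def Claim_equal_order_subset_labels : Prop := ∀ (token_strings : List String), Dom_order_subset_labels token_strings → Spec_order_subset_labels token_strings (order_subset_labels token_strings)

-- ===== LEMMAS AND PROOFS =====

-- abbreviations used by the proof only
def pvDig (l : String) : Bool := PySem.Chars.strIsdigit l.toList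
def pvVal (l : String) : Int := (PySem.Int.ofStr? l).getD 0
-- A's comparison (stable insertion sort on (index, value) pairs, key = value)
def pvBA (q r : Int × Int) : Bool := decide (q.2 < r.2)
-- B's comparison (sorted2's lexicographic `lt` for keys pvKey1/pvKey2)
def pvBB (ts : List String) (i j : Int) : Bool :=
  decide (pvKey1 ts i < pvKey1 ts j) ||
    (!decide (pvKey1 ts j < pvKey1 ts i) && decide (pvKey2 ts i < pvKey2 ts j))

-- insertBy into an append whose tail is all "before": insertion happens in the front part
lemma insertBy_append_of_all_before {α : Type} (before : α → α → Bool) (x : α)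
    (l1 l2 : List α) (h : ∀ y ∈ l2, before x y = true) :
    PySem.List.insertBy before x (l1 ++ l2) = PySem.List.insertBy before x l1 ++ l2 := by
  induction l1 with
  | nil =>
    cases l2 with
    | nil => rfl
    | cons z zs =>
      simp [PySem.List.insertBy, h z (by simp)]
  | cons a l1 ih =>
    simp only [List.cons_append, PySem.List.insertBy]
    by_cases hb : before x a = true
    · simp [hb]
    · simp [hb] at *
      simp [ih]

-- insertBy commutes with map fst when the comparisons agree
lemma insertBy_map_fst (ts : List String) (x : Int × Int) (l : List (Int × Int))
    (h : ∀ q ∈ l, pvBB ts x.1 q.1 = pvBA x q) :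
    (PySem.List.insertBy pvBA x l).map (fun t => t.1)
      = PySem.List.insertBy (pvBB ts) x.1 (l.map (fun t => t.1)) := by
  induction l with
  | nil => rfl
  | cons a l ih =>
    simp only [List.map_cons, PySem.List.insertBy]
    rw [h a (by simp)]
    by_cases hb : pvBA x a = true
    · simp [hb]
    · simp only [Bool.not_eq_true] at hb
      simp [hb, ih (fun q hq => h q (by simp [hq]))]

-- the fold invariant: B's single insertion-sort over indices equals A's
-- (sorted numeric pairs).map fst ++ non-numeric indices, for any consistent accumulators
lemma pv_main (ts : List String) (ps : List (Int × String))
    (accN : List (Int × Int)) (accO : List Int)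
    (hps : ∀ p ∈ ps, PySem.List.pyGet? ts p.1 = some p.2)
    (haccN : ∀ q ∈ accN, ∃ l, PySem.List.pyGet? ts q.1 = some l ∧ pvDig l = true ∧ q.2 = pvVal l)
    (haccO : ∀ i ∈ accO, ∃ l, PySem.List.pyGet? ts i = some l ∧ pvDig l = false) :
    List.foldl (fun acc i => PySem.List.insertBy (pvBB ts) i acc)
        (accN.map (fun t => t.1) ++ accO) (ps.map (fun p => p.1))
      = (List.foldl (fun acc q => PySem.List.insertBy pvBA q acc) accN
          ((ps.filter (fun p => pvDig p.2)).map (fun p => (p.1, pvVal p.2)))).map (fun t => t.1)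
        ++ (accO ++ (ps.filter (fun p => !pvDig p.2)).map (fun p => p.1)) := by
  induction ps generalizing accN accO with
  | nil => simp
  | cons p rest ih =>
    have hp : PySem.List.pyGet? ts p.1 = some p.2 := hps p (by simp)
    by_cases hd : pvDig p.2 = true
    · simp only [pvDig] at hd
      -- numeric label: insertion goes into the accN part, before all of accO
      have hstep : PySem.List.insertBy (pvBB ts) p.1 (accN.map (fun t => t.1) ++ accO)
          = (PySem.List.insertBy pvBA (p.1, pvVal p.2) accN).map (fun t => t.1) ++ accO := by
        rw [insertBy_append_of_all_before _ _ _ _ ?_]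
        · rw [insertBy_map_fst ts (p.1, pvVal p.2) accN ?_]
          intro q hq
          obtain ⟨l, hl, hld, hlv⟩ := haccN q hq
          simp only [pvDig] at hld
          simp [pvBB, pvBA, pvKey1, pvKey2, hp, hl, hd, hld, hlv, pvVal]
        · intro y hy
          obtain ⟨l, hl, hld⟩ := haccO y hy
          simp only [pvDig] at hld
          simp [pvBB, pvKey1, hp, hl, hd, hld]
      have : ∀ q ∈ PySem.List.insertBy pvBA (p.1, pvVal p.2) accN,
          ∃ l, PySem.List.pyGet? ts q.1 = some l ∧ pvDig l = true ∧ q.2 = pvVal l := by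
        intro q hq
        rcases (PySem.List.mem_insertBy _ _ _ _).1 hq with h | h
        · exact h ▸ ⟨p.2, hp, hd, rfl⟩
        · exact haccN q h
      simpa [pvDig, hd, hstep] using
        ih (PySem.List.insertBy pvBA (p.1, pvVal p.2) accN) accO
          (fun r hr => hps r (List.mem_cons_of_mem _ hr)) this haccO
    · -- non-numeric label: appended at the very end
      simp only [Bool.not_eq_true, pvDig] at hd
      have hstep : PySem.List.insertBy (pvBB ts) p.1 (accN.map (fun t => t.1) ++ accO)
          = (accN.map (fun t => t.1) ++ accO) ++ [p.1] := by
        apply PySem.List.insertBy_of_forall_not_before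
        intro y hy
        rcases List.mem_append.1 hy with h | h
        · obtain ⟨q, hq, rfl⟩ := List.mem_map.1 h
          obtain ⟨l, hl, hld, _⟩ := haccN q hq
          simp only [pvDig] at hld
          simp [pvBB, pvKey1, pvKey2, hp, hl, hd, hld]
        · obtain ⟨l, hl, hld⟩ := haccO y h
          simp only [pvDig] at hld
          simp [pvBB, pvKey1, pvKey2, hp, hl, hd, hld]
      have haccO' : ∀ i ∈ accO ++ [p.1],
          ∃ l, PySem.List.pyGet? ts i = some l ∧ pvDig l = false := by
        intro i hi
        rcases List.mem_append.1 hi with h | h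
        · exact haccO i h
        · simp at h; exact h ▸ ⟨p.2, hp, hd⟩
      simpa [pvDig, hd, hstep, List.append_assoc] using
        ih accN (accO ++ [p.1])
          (fun r hr => hps r (List.mem_cons_of_mem _ hr)) haccN haccO'
-- ===== VERDICT (by name: the statement is the Claim_ definition above) =====
theorem order_subset_labels_spec : Claim_equal_order_subset_labels := by
  intro ts _
  unfold Spec_order_subset_labels order_subset_labels order_subset_labels_alt
  have hidx :
      PySem.List.sorted2 (PySem.List.pyRange 0 (ts.length) 1)
        (pvKey1 ts) (pvKey2 ts)
      = (PySem.List.sorted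
          (((PySem.List.enumerate ts).filter (fun p => PySem.Str.strIsdigit p.2)).map
            (fun p => (p.1, (PySem.Int.ofStr? p.2).getD 0))) (fun t => t.2)).map (fun t => t.1)
        ++ ((PySem.List.enumerate ts).filter (fun p => !PySem.Str.strIsdigit p.2)).map
            (fun p => p.1) := by
    have hrange : PySem.List.pyRange 0 (ts.length) 1
        = (PySem.List.enumerate ts).map (fun p => p.1) := by
      simpa using (PySem.List.map_fst_enumerate ts 0).symm
    have hps : ∀ p ∈ PySem.List.enumerate ts 0, PySem.List.pyGet? ts p.1 = some p.2 := by
      intro p hp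
      obtain ⟨k, hk, rfl⟩ := (PySem.List.mem_enumerate_iff ts 0 p).1 hp
      simp [PySem.List.pyGet?_natCast ts k, List.getElem?_eq_getElem hk]
    have h := pv_main ts (PySem.List.enumerate ts) [] [] hps (by simp) (by simp)
    simp only [List.map_nil, List.nil_append, List.append_nil] at h
    show List.foldl _ _ _ = _
    rw [hrange, PySem.List.sorted_eq_foldl_insertBy]
    simp only [PySem.Str.strIsdigit_eq]
    simp only [pvDig, pvVal] at h
    exact h
  rw [hidx]
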